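-- pv_equiv track=rewrite | github.com/MohammedBelkacem/KabyleNLP | tokenization-syllabation/tokennization.py | tokenize_word
-- ===== SOURCE A (Python) =====
-- def tokenize_word(word,suffixe,prefixe):
--     a=''
--     morpheme=word[0:word.find('-')+1]
--
--     lemtized_word=''
--     if (morpheme in prefixe):
--         word=word[word.find('-')+1:len(word)]
--         lemtized_word=lemtized_word+' '+morpheme
--         while word.find('-')>=0:
--
--             morpheme=word[0:word.find('-')+1]
--             word=word[word.find('-')+1:len(word)]
--             lemtized_word=lemtized_word+' '+morpheme
--         lemtized_word=lemtized_word+' '+word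
--     else:
--         morpheme=word[0:word.find('-')]
--         lemtized_word=lemtized_word+' '+morpheme
--         word=word[word.find('-')+1:len(word)]
--         while word.find('-')>=0:
--
--            morpheme=word[0:word.find('-')]
--            lemtized_word=lemtized_word+' '+'-'+morpheme
--            word=word[word.find('-')+1:len(word)]
--     if ('-'+word in suffixe):
--          lemtized_word=lemtized_word+' '+'-'+word
--     else:
--          lemtized_word=lemtized_word
--
--
--
--     return lemtized_word
-- ===== SOURCE B (Python) =====
-- def tokenize_word(word, suffixe, prefixe):
--     # Split once on '-', build the pieces, join at the end (no repeated re-slicing).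
--     parts = word.split('-')
--     last = parts[-1]
--     i = word.find('-')
--     if word[:i + 1] in prefixe:
--         pieces = [' ' + word[:i + 1]] + [' ' + p + '-' for p in parts[1:-1]] + [' ' + last]
--     else:
--         # first segment kept without its '-'; middle segments as '-seg'; last segment
--         # only appears via the suffix check below (as in the original)
--         pieces = [' ' + word[:i]] + [' -' + p for p in parts[1:-1]]
--     if '-' + last in suffixe:
--         pieces.append(' -' + last)
--     return ''.join(pieces)
-- ===== Notes on version B (the rewrite author's own statement) =====
-- stated objective: simpler
-- what changed: B splits the word on '-' once and joins the assembled pieces, replacing A's two while-loops that repeatedly re-run find('-') and re-slice the shrinking word while growing the result by string concatenation.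
import Mathlib
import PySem

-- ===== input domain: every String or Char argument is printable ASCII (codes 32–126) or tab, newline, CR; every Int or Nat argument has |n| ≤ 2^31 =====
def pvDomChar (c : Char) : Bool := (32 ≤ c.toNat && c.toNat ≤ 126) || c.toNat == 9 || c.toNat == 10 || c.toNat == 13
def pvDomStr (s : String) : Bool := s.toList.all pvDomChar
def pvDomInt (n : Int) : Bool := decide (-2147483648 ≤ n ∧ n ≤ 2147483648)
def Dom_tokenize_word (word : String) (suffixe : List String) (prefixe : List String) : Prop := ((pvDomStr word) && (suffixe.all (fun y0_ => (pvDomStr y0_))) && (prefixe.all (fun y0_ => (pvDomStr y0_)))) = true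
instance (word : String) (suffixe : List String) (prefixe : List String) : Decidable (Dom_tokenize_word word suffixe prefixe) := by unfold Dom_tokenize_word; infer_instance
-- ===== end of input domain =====

-- B builds the same output from one split('-') pass joined at the end, instead of A's repeated find('-')/re-slice while-loops; same return value.

-- ===== PORT A =====
-- facts about the first '-' of a word, cited by the loops' termination proofs
theorem pvFind_dash_decomp (w : List Char) (f : ℕ)
    (h : PySem.Chars.find w ['-'] = (f : ℤ)) :
    f < w.length ∧ w.take f ++ '-' :: w.drop (f + 1) = w ∧ '-' ∉ w.take f := by
  have h0 : 0 ≤ PySem.Chars.find w ['-'] := by omega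
  obtain ⟨hpre, hmin⟩ := PySem.Chars.find_spec h0
  rw [h] at hpre hmin
  simp only [Int.toNat_natCast] at hpre hmin
  obtain ⟨t, ht⟩ := hpre
  simp only [List.singleton_append] at ht
  have hlt : f < w.length := by
    by_contra hge
    have : w.drop f = [] := List.drop_eq_nil_of_le (by omega)
    rw [this] at ht; simp at ht
  have hdrop1 : w.drop (f + 1) = t := by
    rw [← List.tail_drop, ← ht, List.tail_cons]
  refine ⟨hlt, ?_, ?_⟩
  · rw [hdrop1, show ('-' :: t) = w.drop f from ht]
    exact List.take_append_drop f w
  · intro hmem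
    obtain ⟨i, hi, hgi⟩ := List.mem_take_iff_getElem.mp hmem
    have hif : i < f := by omega
    exact hmin i hif ⟨(w.drop (i + 1)), by
      have : w.drop i = w[i] :: w.drop (i + 1) :=
        List.drop_eq_getElem_cons (by omega)
      simp [this, hgi]⟩

theorem pv_slice_rest (w : List Char) (f : ℕ)
    (hf : PySem.Chars.find w ['-'] = (f : ℤ)) :
    PySem.Chars.slice w (some (PySem.Chars.find w ['-'] + 1)) (some (w.length : ℤ)) = w.drop (f + 1) := by
  rw [hf]
  have e : ((f : ℤ) + 1) = ((f + 1 : ℕ) : ℤ) := by push_cast; ring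
  rw [e, PySem.Chars.slice_eq_listSlice, PySem.List.slice_natCast]
  exact List.take_of_length_le (by simp)

theorem pvRest_lt (w : List Char) (h : 0 ≤ PySem.Chars.find w ['-']) :
    (PySem.Chars.slice w (some (PySem.Chars.find w ['-'] + 1)) (some (w.length : ℤ))).length < w.length := by
  obtain ⟨f, hf⟩ : ∃ f : ℕ, PySem.Chars.find w ['-'] = (f : ℤ) :=
    ⟨(PySem.Chars.find w ['-']).toNat, (Int.toNat_of_nonneg h).symm⟩
  obtain ⟨hlt, -, -⟩ := pvFind_dash_decomp w f hf
  rw [pv_slice_rest w f hf]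
  simp only [List.length_drop]
  omega

-- while-loop of A's prefix branch: morpheme keeps its '-'
def pvLoopPref (word lem : List Char) : List Char × List Char :=
  if h : 0 ≤ PySem.Chars.find word ['-'] then
    pvLoopPref (PySem.Chars.slice word (some (PySem.Chars.find word ['-'] + 1)) (some (word.length : ℤ)))
      (lem ++ ' ' :: PySem.Chars.slice word (some 0) (some (PySem.Chars.find word ['-'] + 1)))
  else (lem, word)
termination_by word.length
decreasing_by exact pvRest_lt word h

-- while-loop of A's else branch: morpheme without its '-', emitted as ' -morpheme'
def pvLoopElse (word lem : List Char) : List Char × List Char :=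
  if h : 0 ≤ PySem.Chars.find word ['-'] then
    pvLoopElse (PySem.Chars.slice word (some (PySem.Chars.find word ['-'] + 1)) (some (word.length : ℤ)))
      (lem ++ ' ' :: '-' :: PySem.Chars.slice word (some 0) (some (PySem.Chars.find word ['-'])))
  else (lem, word)
termination_by word.length
decreasing_by exact pvRest_lt word h

def tokenize_word (word : String) (suffixe : List String) (prefixe : List String) : String :=
  let w := word.toList
  let morpheme := PySem.Chars.slice w (some 0) (some (PySem.Chars.find w ['-'] + 1))
  if (prefixe.map String.toList).contains morpheme then
    let w1 := PySem.Chars.slice w (some (PySem.Chars.find w ['-'] + 1)) (some (w.length : ℤ))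
    let r := pvLoopPref w1 ([] ++ ' ' :: morpheme)
    let lem := r.1 ++ ' ' :: r.2
    String.mk (if (suffixe.map String.toList).contains ('-' :: r.2) then lem ++ ' ' :: '-' :: r.2 else lem)
  else
    let morpheme2 := PySem.Chars.slice w (some 0) (some (PySem.Chars.find w ['-']))
    let w1 := PySem.Chars.slice w (some (PySem.Chars.find w ['-'] + 1)) (some (w.length : ℤ))
    let r := pvLoopElse w1 ([] ++ ' ' :: morpheme2)
    String.mk (if (suffixe.map String.toList).contains ('-' :: r.2) then r.1 ++ ' ' :: '-' :: r.2 else r.1)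

-- ===== PORT B =====
def tokenize_word_alt (word : String) (suffixe : List String) (prefixe : List String) : String :=
  let w := word.toList
  let parts := w.splitOn '-'
  let last := (PySem.List.pyGet? parts (-1)).getD []
  let i := PySem.Chars.find w ['-']
  let pieces :=
    if (prefixe.map String.toList).contains (PySem.Chars.slice w (some 0) (some (i + 1))) then
      (' ' :: PySem.Chars.slice w (some 0) (some (i + 1))) ::
        ((PySem.List.slice parts (some 1) (some (-1))).map (fun p => ' ' :: (p ++ ['-'])) ++ [' ' :: last])
    else
      (' ' :: PySem.Chars.slice w (some 0) (some i)) ::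
        (PySem.List.slice parts (some 1) (some (-1))).map (fun p => ' ' :: '-' :: p)
  let pieces2 := if (suffixe.map String.toList).contains ('-' :: last) then pieces ++ [' ' :: '-' :: last] else pieces
  String.mk (PySem.Chars.join [] pieces2)

-- ===== PRECONDITION & SPEC =====
def Spec_tokenize_word (word : String) (suffixe : List String) (prefixe : List String) (out : String) : Prop := out = tokenize_word_alt word suffixe prefixe
instance (word : String) (suffixe : List String) (prefixe : List String) (out : String) : Decidable (Spec_tokenize_word word suffixe prefixe out) := by unfold Spec_tokenize_word; infer_instance

-- ===== CLAIM (what is proved, stated in full; the proofs are below) =====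
def Claim_equal_tokenize_word : Prop := ∀ (word : String) (suffixe : List String) (prefixe : List String), Dom_tokenize_word word suffixe prefixe → Spec_tokenize_word word suffixe prefixe (tokenize_word word suffixe prefixe)

-- ===== LEMMAS AND PROOFS =====

theorem pv_join_nil_flatten (ps : List (List Char)) : PySem.Chars.join [] ps = ps.flatten := by
  simp only [PySem.Chars.join, List.intercalate]
  induction ps with
  | nil => rfl
  | cons a t ih =>
    cases t with
    | nil => rfl
    | cons b t' => simp_all [List.intersperse]

theorem pv_splitOn_not_mem (l : List Char) (h : '-' ∉ l) : l.splitOn '-' = [l] := by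
  induction l with
  | nil => rfl
  | cons a t ih =>
    simp only [List.mem_cons, not_or] at h
    show List.splitOnP (· == '-') (a :: t) = [a :: t]
    rw [List.splitOnP_cons]
    have ha : ¬ a = '-' := fun he => h.1 he.symm
    have : List.splitOnP (· == '-') t = [t] := ih h.2
    simp [ha, this]

theorem pv_splitOn_sep (l1 l2 : List Char) (h : '-' ∉ l1) :
    (l1 ++ '-' :: l2).splitOn '-' = l1 :: l2.splitOn '-' := by
  induction l1 with
  | nil =>
    show List.splitOnP (· == '-') ('-' :: l2) = [] :: List.splitOnP (· == '-') l2
    rw [List.splitOnP_cons]; simp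
  | cons a t ih =>
    simp only [List.mem_cons, not_or] at h
    have hrec : List.splitOnP (· == '-') (t ++ '-' :: l2) = t :: List.splitOnP (· == '-') l2 := ih h.2
    show List.splitOnP (· == '-') (a :: (t ++ '-' :: l2)) = (a :: t) :: List.splitOnP (· == '-') l2
    have ha : ¬ a = '-' := fun he => h.1 he.symm
    rw [List.splitOnP_cons, if_neg (by simp [ha]), hrec]
    rfl

theorem pv_splitOn_ne_nil (l : List Char) : l.splitOn '-' ≠ [] := List.splitOnP_ne_nil _ l

theorem pv_find_neg (w : List Char) (h : ¬ 0 ≤ PySem.Chars.find w ['-']) :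
    PySem.Chars.find w ['-'] = -1 ∧ '-' ∉ w := by
  have hb := PySem.Chars.neg_one_le_find (s := w) (sub := ['-'])
  have he : PySem.Chars.find w ['-'] = -1 := by omega
  refine ⟨he, fun hmem => ?_⟩
  have h2 := (PySem.Chars.find_eq_neg_one_iff w ['-']).mp he
  exact h2 ((List.singleton_infix_iff '-' w).mpr hmem)

theorem pv_slice_one_neg_one {α : Type} (xs : List α) :
    PySem.List.slice xs (some 1) (some (-1)) = xs.tail.dropLast := by
  cases xs with
  | nil => rfl
  | cons a t =>
    simp only [PySem.List.slice, PySem.List.clampIdx]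
    norm_num
    rw [List.dropLast_eq_take]
    congr 1

theorem pv_slice_take (w : List Char) (k : ℕ) :
    PySem.Chars.slice w (some 0) (some (k : ℤ)) = w.take k := by
  rw [show ((0 : ℤ)) = ((0 : ℕ) : ℤ) from rfl, PySem.Chars.slice_eq_listSlice, PySem.List.slice_natCast]
  simp

theorem pv_take_succ_dash (w : List Char) (f : ℕ)
    (hf : PySem.Chars.find w ['-'] = (f : ℤ)) :
    w.take (f + 1) = w.take f ++ ['-'] := by
  obtain ⟨hlt, hw, -⟩ := pvFind_dash_decomp w f hf
  have hdf : w.drop f = '-' :: w.drop (f + 1) :=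
    (List.append_cancel_left ((List.take_append_drop f w).trans hw.symm))
  rw [List.take_add, hdf]
  rfl

theorem pv_getLastD_cons (a : List Char) (t : List (List Char)) (h : t ≠ []) (d : List Char) :
    (a :: t).getLastD d = t.getLastD d := by
  cases t with
  | nil => exact absurd rfl h
  | cons b t' => rfl

theorem pv_pyGet_neg_one (xs : List (List Char)) (h : xs ≠ []) :
    (PySem.List.pyGet? xs (-1)).getD [] = xs.getLastD [] := by
  have hlen : 1 ≤ xs.length := by
    cases xs with
    | nil => exact absurd rfl h
    | cons a t => simp
  simp only [PySem.List.pyGet?, PySem.List.pyIdx?]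
  rw [if_neg (by omega), if_pos (by push_cast; omega)]
  simp only [Option.bind_some]
  rw [show ((-(-1:ℤ)).toNat) = 1 from rfl]
  rw [← List.getLast?_eq_getElem?]
  cases xs with
  | nil => exact absurd rfl h
  | cons a t => simp [List.getLastD_eq_getLast?]

theorem pv_dropLast_cons (a : List Char) (t : List (List Char)) (h : t ≠ []) :
    (a :: t).dropLast = a :: t.dropLast := List.dropLast_cons_of_ne_nil h

-- characterisation of A's two while-loops in terms of split('-')
theorem pvLoopPref_eq (n : ℕ) (w lem : List Char) (hn : w.length ≤ n) :
    pvLoopPref w lem =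
      (lem ++ (((w.splitOn '-').dropLast.map (fun p => ' ' :: (p ++ ['-']))).flatten),
       (w.splitOn '-').getLastD []) := by
  induction n generalizing w lem with
  | zero =>
    have hw : w = [] := List.eq_nil_of_length_eq_zero (by omega)
    subst hw
    rw [pvLoopPref, dif_neg (by decide)]
    simp
  | succ n ih =>
    rw [pvLoopPref]
    by_cases h : 0 ≤ PySem.Chars.find w ['-']
    · rw [dif_pos h]
      obtain ⟨f, hf⟩ : ∃ f : ℕ, PySem.Chars.find w ['-'] = (f : ℤ) :=
        ⟨(PySem.Chars.find w ['-']).toNat, (Int.toNat_of_nonneg h).symm⟩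
      obtain ⟨hlt, hw, hnm⟩ := pvFind_dash_decomp w f hf
      have hmor : PySem.Chars.slice w (some 0) (some (PySem.Chars.find w ['-'] + 1)) = w.take (f + 1) := by
        rw [hf, show ((f : ℤ) + 1) = ((f + 1 : ℕ) : ℤ) by push_cast; ring]
        exact pv_slice_take w (f + 1)
      have hsplit : w.splitOn '-' = w.take f :: (w.drop (f + 1)).splitOn '-' := by
        conv_lhs => rw [← hw]
        exact pv_splitOn_sep _ _ hnm
      rw [pv_slice_rest w f hf, hmor, ih _ _ (by simp; omega), hsplit,
          pv_dropLast_cons _ _ (pv_splitOn_ne_nil _),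
          pv_getLastD_cons _ _ (pv_splitOn_ne_nil _),
          pv_take_succ_dash w f hf]
      simp
    · rw [dif_neg h]
      obtain ⟨-, hnm⟩ := pv_find_neg w h
      rw [pv_splitOn_not_mem w hnm]
      simp

theorem pvLoopElse_eq (n : ℕ) (w lem : List Char) (hn : w.length ≤ n) :
    pvLoopElse w lem =
      (lem ++ (((w.splitOn '-').dropLast.map (fun p => ' ' :: '-' :: p)).flatten),
       (w.splitOn '-').getLastD []) := by
  induction n generalizing w lem with
  | zero =>
    have hw : w = [] := List.eq_nil_of_length_eq_zero (by omega)
    subst hw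
    rw [pvLoopElse, dif_neg (by decide)]
    simp
  | succ n ih =>
    rw [pvLoopElse]
    by_cases h : 0 ≤ PySem.Chars.find w ['-']
    · rw [dif_pos h]
      obtain ⟨f, hf⟩ : ∃ f : ℕ, PySem.Chars.find w ['-'] = (f : ℤ) :=
        ⟨(PySem.Chars.find w ['-']).toNat, (Int.toNat_of_nonneg h).symm⟩
      obtain ⟨hlt, hw, hnm⟩ := pvFind_dash_decomp w f hf
      have hmor : PySem.Chars.slice w (some 0) (some (PySem.Chars.find w ['-'])) = w.take f := by
        rw [hf]; exact pv_slice_take w f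
      have hsplit : w.splitOn '-' = w.take f :: (w.drop (f + 1)).splitOn '-' := by
        conv_lhs => rw [← hw]
        exact pv_splitOn_sep _ _ hnm
      rw [pv_slice_rest w f hf, hmor, ih _ _ (by simp; omega), hsplit,
          pv_dropLast_cons _ _ (pv_splitOn_ne_nil _),
          pv_getLastD_cons _ _ (pv_splitOn_ne_nil _)]
      simp
    · rw [dif_neg h]
      obtain ⟨-, hnm⟩ := pv_find_neg w h
      rw [pv_splitOn_not_mem w hnm]
      simp

-- ===== VERDICT (by name: the statement is the Claim_ definition above) =====
theorem tokenize_word_spec : Claim_equal_tokenize_word := by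
  intro word suffixe prefixe _
  unfold Spec_tokenize_word tokenize_word tokenize_word_alt
  simp only []
  set w := word.toList with hwdef
  by_cases h : 0 ≤ PySem.Chars.find w ['-']
  · obtain ⟨f, hf⟩ : ∃ f : ℕ, PySem.Chars.find w ['-'] = (f : ℤ) :=
      ⟨(PySem.Chars.find w ['-']).toNat, (Int.toNat_of_nonneg h).symm⟩
    obtain ⟨hlt, hw, hnm⟩ := pvFind_dash_decomp w f hf
    have hsplit : w.splitOn '-' = w.take f :: (w.drop (f + 1)).splitOn '-' := by
      conv_lhs => rw [← hw]
      exact pv_splitOn_sep _ _ hnm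
    have hne := pv_splitOn_ne_nil (w.drop (f + 1))
    have hlast : (PySem.List.pyGet? (w.splitOn '-') (-1)).getD [] = ((w.drop (f + 1)).splitOn '-').getLastD [] := by
      rw [pv_pyGet_neg_one _ (pv_splitOn_ne_nil w), hsplit, pv_getLastD_cons _ _ hne]
    have hmid : PySem.List.slice (w.splitOn '-') (some 1) (some (-1)) = ((w.drop (f + 1)).splitOn '-').dropLast := by
      rw [pv_slice_one_neg_one, hsplit, List.tail_cons]
    rw [pv_slice_rest w f hf, hlast, hmid,
        pvLoopPref_eq (w.drop (f + 1)).length _ _ le_rfl,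
        pvLoopElse_eq (w.drop (f + 1)).length _ _ le_rfl]
    simp only [pv_join_nil_flatten]
    split_ifs
    all_goals simp [List.append_assoc]
  · obtain ⟨he, hnm⟩ := pv_find_neg w h
    have hsplit : w.splitOn '-' = [w] := pv_splitOn_not_mem w hnm
    have hlast : (PySem.List.pyGet? (w.splitOn '-') (-1)).getD [] = w := by
      rw [pv_pyGet_neg_one _ (pv_splitOn_ne_nil w), hsplit]; rfl
    have hmid : PySem.List.slice (w.splitOn '-') (some 1) (some (-1)) = [] := by
      rw [pv_slice_one_neg_one, hsplit]; rfl
    have hrest : PySem.Chars.slice w (some (PySem.Chars.find w ['-'] + 1)) (some (w.length : ℤ)) = w := by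
      rw [he]; norm_num
    rw [hlast, hmid, hrest,
        pvLoopPref_eq w.length _ _ le_rfl, pvLoopElse_eq w.length _ _ le_rfl, hsplit]
    rw [show ([w].getLastD [] : List Char) = w from rfl]
    simp only [pv_join_nil_flatten]
    split_ifs
    all_goals simp [List.append_assoc]
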